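-- pv_equiv track=rewrite | github.com/ghamerly/adventofcode2023 | 02/2.py | part1
-- ===== SOURCE A (Python) =====
-- def part1(data):
--     # The Elf would first like to know which games would have been possible if
--     # the bag contained only 12 red cubes, 13 green cubes, and 14 blue cubes?
--     def valid_game(sets):
--         return sets['red'] <= 12 and sets['green'] <= 13 and sets['blue'] <= 14
--
--     sum_valid_game_ids = 0
--     for game_id, sets in data:
--         if all(valid_game(s) for s in sets):
--             sum_valid_game_ids += game_id
--
--     return sum_valid_game_ids
-- ===== SOURCE B (Python) =====
-- def part1(data):
--     # Staged reduce-then-threshold: first reduce every game to its "minimum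
--     # required bag" (per-color maximum over its draws, 0 for a game with no
--     # draws), then sum the ids of the games whose bag fits in 12/13/14.
--     def required(sets, color):
--         return max((s[color] for s in sets), default=0)
--
--     bags = [(game_id, (required(sets, 'red'),
--                        required(sets, 'green'),
--                        required(sets, 'blue')))
--             for game_id, sets in data]
--     return sum(game_id for game_id, (r, g, b) in bags
--                if r <= 12 and g <= 13 and b <= 14)
-- ===== Notes on version B (the rewrite author's own statement) =====
-- stated objective: alternative
-- what changed: Instead of checking each draw's validity and short-circuiting with all(...), B first reduces every game to its minimum required bag (per-color maxima over the draws, max with default=0) and then sums the ids of the games whose bag fits within 12/13/14 in a second pass.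
-- outside the precondition, e.g. on part1([(1, [{'red': 13}, {}])]): A returns 0, B raises KeyError
import Mathlib
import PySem

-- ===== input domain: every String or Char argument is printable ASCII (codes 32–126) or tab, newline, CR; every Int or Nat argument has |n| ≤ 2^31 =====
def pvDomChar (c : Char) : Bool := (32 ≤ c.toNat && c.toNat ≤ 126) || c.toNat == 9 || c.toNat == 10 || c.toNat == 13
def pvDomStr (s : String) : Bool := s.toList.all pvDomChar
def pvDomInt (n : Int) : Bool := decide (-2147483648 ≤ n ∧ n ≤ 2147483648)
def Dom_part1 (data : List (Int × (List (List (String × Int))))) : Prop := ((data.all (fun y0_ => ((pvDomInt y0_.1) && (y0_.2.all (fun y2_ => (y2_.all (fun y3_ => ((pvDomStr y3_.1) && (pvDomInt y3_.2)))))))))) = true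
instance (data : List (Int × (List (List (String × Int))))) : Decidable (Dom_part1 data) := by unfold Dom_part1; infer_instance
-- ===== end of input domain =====

-- B reduces each game to its minimum required bag (per-color maximum over the draws) in one pass,
-- then sums the ids of fitting games in a second, instead of per-draw validity with all(...); same cost.

-- shared dict primitive: Python's s[c] on the association list s
-- (first match, as the Dict the list stands for); exact where the key is present,
-- which Pre_part1 guarantees for every draw.
def lookupD (s : List (String × Int)) (c : String) : Int :=
  PySem.Dict.getD (PySem.Dict.mk s) c 0

def hasKey (s : List (String × Int)) (c : String) : Bool :=
  PySem.Dict.contains (PySem.Dict.mk s) c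

-- ===== PORT A =====
-- valid_game: the three lookups s['red'] … ; via lookupD this is exact under
-- Pre_part1, which excludes every input on which some evaluated s[…] raises KeyError.
def validGame (s : List (String × Int)) : Bool :=
  decide (lookupD s "red" ≤ 12) && decide (lookupD s "green" ≤ 13) && decide (lookupD s "blue" ≤ 14)

def part1 (data : List (Int × (List (List (String × Int))))) : Int :=
  data.foldl (fun acc g => if g.2.all validGame then acc + g.1 else acc) 0

-- ===== PORT B =====
-- required(sets, color): Python's max(generator, default=0) — first element as the
-- starting value, foldl max over the rest; 0 on a game with no draws.
def requiredColor (sets : List (List (String × Int))) (c : String) : Int :=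
  match sets.map (fun s => lookupD s c) with
  | [] => 0
  | x :: xs => xs.foldl max x

-- bags = [(game_id, (required red, required green, required blue)) …], then the filtering sum
def part1_alt (data : List (Int × (List (List (String × Int))))) : Int :=
  (((data.map (fun gm =>
        (gm.1, (requiredColor gm.2 "red", requiredColor gm.2 "green", requiredColor gm.2 "blue")))).filter
      (fun gb => decide (gb.2.1 ≤ 12) && decide (gb.2.2.1 ≤ 13) && decide (gb.2.2.2 ≤ 14))).map
    (fun gb => gb.1)).sum

-- ===== PRECONDITION & SPEC =====
-- Pre_part1 excludes inputs where some draw lacks a 'red'/'green'/'blue' key: there B itself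
-- raises KeyError, and A either raises (when the all(...) scan reaches the draw) or returns
-- only by accident of the scan's short-circuit.
def Pre_part1 (data : List (Int × (List (List (String × Int))))) : Prop :=
  ∀ g ∈ data, ∀ s ∈ g.2,
    hasKey s "red" = true ∧ hasKey s "green" = true ∧ hasKey s "blue" = true
instance (data : List (Int × (List (List (String × Int))))) : Decidable (Pre_part1 data) := by
  unfold Pre_part1; infer_instance

def pvWitness_part1 : (List (Int × (List (List (String × Int))))) :=
  [(1, [[("red", 1), ("green", 2), ("blue", 3)]]), (2, [[("red", 13), ("green", 0), ("blue", 0)]])]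

def Spec_part1 (data : List (Int × (List (List (String × Int))))) (out : Int) : Prop := out = part1_alt data
instance (data : List (Int × (List (List (String × Int))))) (out : Int) : Decidable (Spec_part1 data out) := by unfold Spec_part1; infer_instance

-- ===== CLAIM (what is proved, stated in full; the proofs are below) =====
def Claim_equal_part1 : Prop := ∀ (data : List (Int × (List (List (String × Int))))), Dom_part1 data → Pre_part1 data → Spec_part1 data (part1 data)

-- ===== LEMMAS AND PROOFS =====

theorem le_foldl_max_init (l : List Int) (a : Int) : a ≤ l.foldl max a := by
  induction l generalizing a with
  | nil => exact le_refl a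
  | cons x xs ih => exact le_trans (le_max_left a x) (ih (max a x))

theorem le_foldl_max_mem {x : Int} {l : List Int} (a : Int) (hx : x ∈ l) :
    x ≤ l.foldl max a := by
  induction l generalizing a with
  | nil => cases hx
  | cons y ys ih =>
      rcases List.mem_cons.mp hx with rfl | h
      · exact le_trans (le_max_right a x) (le_foldl_max_init ys (max a x))
      · exact ih (max a y) h

theorem foldl_max_le {k a : Int} {l : List Int} (ha : a ≤ k) (h : ∀ x ∈ l, x ≤ k) :
    l.foldl max a ≤ k := by
  induction l generalizing a with
  | nil => exact ha
  | cons y ys ih =>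
      exact ih (max_le ha (h y (List.mem_cons_self))) (fun x hx => h x (List.mem_cons_of_mem _ hx))

theorem req_le_iff (sets : List (List (String × Int))) (c : String) (k : Int) (h0 : (0:Int) ≤ k) :
    requiredColor sets c ≤ k ↔ ∀ s ∈ sets, lookupD s c ≤ k := by
  cases sets with
  | nil => simpa [requiredColor] using h0
  | cons s rest =>
      simp only [requiredColor, List.map_cons]
      constructor
      · intro h t ht
        rcases List.mem_cons.mp ht with rfl | ht
        · exact le_trans (le_foldl_max_init _ _) h
        · exact le_trans (le_foldl_max_mem _ (List.mem_map_of_mem (f := fun s => lookupD s c) ht)) h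
      · intro h
        refine foldl_max_le (h s List.mem_cons_self) ?_
        intro x hx
        obtain ⟨t, ht, rfl⟩ := List.mem_map.mp hx
        exact h t (List.mem_cons_of_mem _ ht)

theorem all_eq_fits (sets : List (List (String × Int))) :
    sets.all validGame = (decide (requiredColor sets "red" ≤ 12)
      && decide (requiredColor sets "green" ≤ 13) && decide (requiredColor sets "blue" ≤ 14)) := by
  by_cases h : ∀ s ∈ sets, validGame s = true
  · have h1 : ∀ s ∈ sets, lookupD s "red" ≤ 12 := by
      intro s hs; have := h s hs; simp [validGame] at this; exact this.1.1
    have h2 : ∀ s ∈ sets, lookupD s "green" ≤ 13 := by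
      intro s hs; have := h s hs; simp [validGame] at this; exact this.1.2
    have h3 : ∀ s ∈ sets, lookupD s "blue" ≤ 14 := by
      intro s hs; have := h s hs; simp [validGame] at this; exact this.2
    rw [List.all_eq_true.mpr h]
    simp [(req_le_iff sets "red" 12 (by norm_num)).mpr h1,
      (req_le_iff sets "green" 13 (by norm_num)).mpr h2,
      (req_le_iff sets "blue" 14 (by norm_num)).mpr h3]
  · push_neg at h
    obtain ⟨s, hs, hv⟩ := h
    have hall : sets.all validGame = false := by
      rcases Bool.eq_false_or_eq_true (sets.all validGame) with h' | h'
      · exact absurd (List.all_eq_true.mp h' s hs) hv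
      · exact h'

    rw [hall]
    have hv' : ¬ (lookupD s "red" ≤ 12 ∧ lookupD s "green" ≤ 13 ∧ lookupD s "blue" ≤ 14) := by
      intro ⟨a, b, c⟩; exact hv (by simp [validGame, a, b, c])
    by_cases hr : lookupD s "red" ≤ 12
    · by_cases hg : lookupD s "green" ≤ 13
      · have hb : ¬ lookupD s "blue" ≤ 14 := fun hb => hv' ⟨hr, hg, hb⟩
        have : ¬ requiredColor sets "blue" ≤ 14 :=
          fun hc => hb ((req_le_iff sets "blue" 14 (by norm_num)).mp hc s hs)
        simp [this]
      · have : ¬ requiredColor sets "green" ≤ 13 :=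
          fun hc => hg ((req_le_iff sets "green" 13 (by norm_num)).mp hc s hs)
        simp [this]
    · have : ¬ requiredColor sets "red" ≤ 12 :=
        fun hc => hr ((req_le_iff sets "red" 12 (by norm_num)).mp hc s hs)
      simp [this]

theorem foldl_filter_sum (l : List (Int × (List (List (String × Int))))) (acc : Int)
    (p : (Int × (List (List (String × Int)))) → Bool) :
    l.foldl (fun a g => if p g then a + g.1 else a) acc = acc + ((l.filter p).map (fun gm => gm.1)).sum := by
  induction l generalizing acc with
  | nil => simp
  | cons g t ih =>
      by_cases hp : p g
      · simp [hp, ih, ]; ring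
      · simp [hp, ih, ]

-- ===== VERDICT (by name: the statement is the Claim_ definition above) =====
theorem part1_spec : Claim_equal_part1 := by
  intro data _ _
  unfold Spec_part1 part1 part1_alt
  rw [foldl_filter_sum data 0 (fun g : Int × List (List (String × Int)) => g.2.all validGame),
    zero_add, List.filter_map, List.map_map]
  have hf : data.filter ((fun gb : Int × Int × Int × Int =>
        decide (gb.2.1 ≤ 12) && decide (gb.2.2.1 ≤ 13) && decide (gb.2.2.2 ≤ 14)) ∘
      (fun gm : Int × List (List (String × Int)) =>
        (gm.1, (requiredColor gm.2 "red", requiredColor gm.2 "green", requiredColor gm.2 "blue"))))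
      = data.filter (fun g => g.2.all validGame) :=
    List.filter_congr (fun g _ => (all_eq_fits g.2).symm)
  rw [hf]
  rfl
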